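-- pv_equiv track=rewrite | github.com/Tprkgn/BasicPython | HW2_-_All_Solutions.py | starters
-- ===== SOURCE A (Python) =====
-- def starters(list, k):
--     capitals = {}
--     result = set({})
--     result.clear()
--     for i in list:
--         if len(i) > 0:
--             if i[0].lower() not in capitals.keys():
--                 capitals[i[0].lower()] = 1
--             else:
--                 capitals[i[0].lower()] += 1
--
--     for key in capitals.keys():
--         if capitals[key] >= k:
--             result.add(key)
--
--     return result
-- ===== SOURCE B (Python) =====
-- def starters(list, k):
--     # recursive partition: take the first letter still present, split it off,
--     # recurse on the words whose first letter differs
--     words = [w for w in list if len(w) > 0]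
--
--     def go(ws):
--         if not ws:
--             return set()
--         c = ws[0][0].lower()
--         rest = [w for w in ws if w[0].lower() != c]
--         r = go(rest)
--         if len(ws) - len(rest) >= k:
--             r.add(c)
--         return r
--
--     return go(words)
-- ===== Notes on version B (the rewrite author's own statement) =====
-- stated objective: alternative
-- what changed: B replaces A's incremental counting dict plus second threshold loop by a recursive partition: repeatedly split off all words sharing the first remaining first-letter, compare that partition's size with k, and recurse on the remainder (no frequency map at all).
import Mathlib
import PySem

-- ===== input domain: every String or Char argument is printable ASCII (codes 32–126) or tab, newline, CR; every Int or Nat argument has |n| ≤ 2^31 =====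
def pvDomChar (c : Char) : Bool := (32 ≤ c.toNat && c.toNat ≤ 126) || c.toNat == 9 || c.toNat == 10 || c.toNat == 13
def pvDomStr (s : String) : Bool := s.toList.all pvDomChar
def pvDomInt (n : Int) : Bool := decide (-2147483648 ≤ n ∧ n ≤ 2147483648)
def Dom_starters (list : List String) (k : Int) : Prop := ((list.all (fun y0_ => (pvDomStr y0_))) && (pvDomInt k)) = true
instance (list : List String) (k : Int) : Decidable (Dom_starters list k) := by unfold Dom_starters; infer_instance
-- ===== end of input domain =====

-- B computes the same set by recursive partition on the first remaining first-letter (no frequency dict), instead of A's incremental counting dict plus threshold loop; objective: alternative.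


-- ===== PORT A =====
-- a non-empty Python word i's one-char string i[0].lower() is represented by its character
-- PySem.Chars.lowerChar (i.toList.headD ' '), turned back into a one-char String when added to the result set.
def starters (list : List String) (k : Int) : List String :=
  let capitals : PySem.Dict Char Int :=
    list.foldl (fun d i =>
      if 0 < PySem.Str.len i then
        if d.contains (PySem.Chars.lowerChar (i.toList.headD ' ')) = false then
          d.insert (PySem.Chars.lowerChar (i.toList.headD ' ')) 1
        else
          d.insert (PySem.Chars.lowerChar (i.toList.headD ' '))
            (d.getD (PySem.Chars.lowerChar (i.toList.headD ' ')) 0 + 1)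
      else d) PySem.Dict.empty
  let result : PySem.Set String :=
    capitals.keys.foldl (fun r key =>
      if k ≤ capitals.getD key 0 then PySem.Set.add r (String.ofList [key]) else r)
      PySem.Set.empty
  result

-- ===== PORT B =====
-- Source B's inner go(ws): split off every word sharing ws[0]'s first letter, recurse on the rest.
-- The recursion runs over the lowercased first letters (one char per non-empty word);
-- 'r.add(c)' becomes a prepend: c is fresh for r, whose letters all come from rest (all ≠ c).
def startersGo (k : Int) : List Char → List String
  | [] => []
  | c :: t =>
    let rest := t.filter (fun x => x ≠ c)   -- ws[0] itself never passes Source B's '!= c' filter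
    let r := startersGo k rest
    if k ≤ ((c :: t).length : Int) - rest.length then String.ofList [c] :: r else r
  termination_by l => l.length
  decreasing_by
    simp only [List.length_unattach, List.length_cons]
    exact Nat.lt_succ_of_le (le_trans (List.length_filter_le _ _) (by simp))

def starters_alt (list : List String) (k : Int) : List String :=
  startersGo k
    ((list.filter (fun w => 0 < PySem.Str.len w)).map
      (fun w => PySem.Chars.lowerChar (w.toList.headD ' ')))

-- ===== PRECONDITION & SPEC =====
def Spec_starters (list : List String) (k : Int) (out : List String) : Prop := out = starters_alt list k
instance (list : List String) (k : Int) (out : List String) : Decidable (Spec_starters list k out) := by unfold Spec_starters; infer_instance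

-- ===== CLAIM (what is proved, stated in full; the proofs are below) =====
def Claim_equal_starters : Prop := ∀ (list : List String) (k : Int), Dom_starters list k → Spec_starters list k (starters list k)

-- ===== LEMMAS AND PROOFS =====

-- a guarded fold over the raw list is the fold over the filtered-and-keyed list
theorem pv_foldl_filter_map {A B C : Type} (P : A -> Prop) [DecidablePred P]
    (key : A -> B) (step : C -> B -> C) :
    forall (l : List A) (d : C),
      l.foldl (fun d i => if P i then step d (key i) else d) d
        = ((l.filter (fun i => decide (P i))).map key).foldl step d := by
  intro l
  induction l with
  | nil => intro d; rfl
  | cons x xs ih => intro d; by_cases h : P x <;> simp [h, ih]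

-- A's two counting branches are one insert of getD+1
theorem pv_stepA_eq :
    (fun (d : PySem.Dict Char Int) (c : Char) =>
        if d.contains c = false then d.insert c 1 else d.insert c (d.getD c 0 + 1))
      = fun d c => d.insert c (d.getD c 0 + 1) := by
  funext d c
  by_cases hc : d.contains c = true
  · simp [hc]
  · have hc' : d.contains c = false := by simpa using hc
    rw [if_pos hc', PySem.Dict.getD_of_not_contains d 0 hc']
    norm_num

-- folding Set.add of one-char strings (under a filter) over a Nodup char list appends its filtered image
theorem pv_setFold (k : Int) (dct : PySem.Dict Char Int) :
    ∀ (l : List Char) (r : List String), l.Nodup → (∀ c ∈ l, String.ofList [c] ∉ r) →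
      l.foldl (fun r key =>
          if k ≤ dct.getD key 0 then PySem.Set.add r (String.ofList [key]) else r) r
        = r ++ (l.filter (fun c => k ≤ dct.getD c 0)).map (fun c => String.ofList [c]) := by
  intro l
  induction l with
  | nil => intro r _ _; simp
  | cons x xs ih =>
    intro r hnd hfresh
    have hx : String.ofList [x] ∉ r := hfresh x (by simp)
    have hnd' : xs.Nodup := hnd.of_cons
    rw [List.foldl_cons]
    by_cases h : k ≤ dct.getD x 0
    · have hadd : PySem.Set.add r (String.ofList [x]) = r ++ [String.ofList [x]] := by
        simp [PySem.Set.add, PySem.Set.contains, hx]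
      have hfresh' : ∀ y ∈ xs, String.ofList [y] ∉ r ++ [String.ofList [x]] := by
        intro y hy
        have hyx : y ≠ x := fun he => (List.nodup_cons.mp hnd).1 (he ▸ hy)
        have hne : String.ofList [y] ≠ String.ofList [x] := by
          intro he
          exact hyx (by simpa using congrArg String.toList he)
        simp [hfresh y (List.mem_cons_of_mem _ hy), hne]
      rw [if_pos h, hadd, ih (r ++ [String.ofList [x]]) hnd' hfresh']
      simp [h]
    · rw [if_neg h, ih r hnd' (fun y hy => hfresh y (List.mem_cons_of_mem _ hy))]
      simp [h]

-- Python's set() (first-occurrence dedup) commutes with a value-based filter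
theorem pv_filter_ofList {A : Type} [DecidableEq A] (p : A → Bool) :
    ∀ (t : List A), (PySem.Set.ofList t).filter p = PySem.Set.ofList (t.filter p) := by
  intro t
  induction t with
  | nil => rfl
  | cons x xs ih =>
    rw [PySem.Set.ofList_cons]
    by_cases hp : p x = true
    · rw [List.filter_cons_of_pos hp, List.filter_cons_of_pos hp, PySem.Set.ofList_cons]
      simp only [PySem.Set.discard]
      rw [List.filter_comm, ih]
    · have hp' : p x = false := by simpa using hp
      rw [List.filter_cons_of_neg (by simp [hp']), List.filter_cons_of_neg (by simp [hp'])]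
      simp only [PySem.Set.discard]
      rw [List.filter_filter, ← ih]
      apply List.filter_congr
      intro a _
      by_cases hax : a = x
      · simp [hax, hp']
      · simp [hax]

-- set(xs) of a cons = head followed by set of the tail with the head's value removed
theorem pv_ofList_cons_filter {A : Type} [DecidableEq A] (c : A) (t : List A) :
    PySem.Set.ofList (c :: t) = c :: PySem.Set.ofList (t.filter (fun x => x ≠ c)) := by
  rw [PySem.Set.ofList_cons]
  congr 1
  simp only [PySem.Set.discard]
  rw [pv_filter_ofList]
  congr 1
  apply List.filter_congr
  intro a _
  by_cases h : a = c <;> simp [h]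

-- count of the head = length dropped by the '≠ head' filter
theorem pv_count_head_nat (c : Char) : ∀ (t : List Char),
    t.length = (t.filter (fun x => x ≠ c)).length + t.count c := by
  intro t
  induction t with
  | nil => rfl
  | cons x xs ih =>
    by_cases hx : x = c <;> simp [hx, ih] <;> omega

theorem pv_count_head (c : Char) (t : List Char) :
    ((c :: t).length : Int) - ((t.filter (fun x => x ≠ c)).length : Int)
      = ((c :: t).count c : Int) := by
  have h := pv_count_head_nat c t
  have h3 : (c :: t).count c = t.count c + 1 := by simp
  simp only [List.length_cons, h3]
  omega

-- what B's recursion computes: the threshold-filtered first-occurrence dedup, as one-char strings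
theorem pv_goB_aux (k : Int) :
    ∀ (n : Nat) (L : List Char), L.length ≤ n → startersGo k L
      = ((PySem.Set.ofList L).filter (fun c => k ≤ (L.count c : Int))).map
          (fun c => String.ofList [c]) := by
  intro n
  induction n with
  | zero =>
    intro L hL
    have : L = [] := List.eq_nil_of_length_eq_zero (Nat.le_zero.mp hL)
    subst this
    simp [startersGo]
  | succ n ih =>
    intro L hL
    match L with
    | [] => simp [startersGo]
    | c :: t =>
      rw [startersGo]
      have hrest : (t.filter (fun x => x ≠ c)).length ≤ n := by
        have := List.length_filter_le (fun x => decide (x ≠ c)) t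
        simp only [List.length_cons] at hL
        omega
      rw [pv_ofList_cons_filter c t]
      by_cases hc : k ≤ (((c :: t).count c : Nat) : Int)
      · rw [if_pos (by rw [pv_count_head]; exact_mod_cast hc)]
        rw [List.filter_cons_of_pos (by simpa using hc), List.map_cons]
        congr 1
        rw [ih _ hrest]
        congr 1
        apply List.filter_congr
        intro x hx
        have hxne : x ≠ c := by
          have hmem := (PySem.Set.mem_ofList _ _).mp hx
          have := List.of_mem_filter hmem
          simpa using this
        have hcnt : List.count x (c :: t) = List.count x (List.filter (fun y => decide (y ≠ c)) t) := by
          rw [show List.count x (c :: t) = List.count x t from by simp [Ne.symm hxne]]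
          rw [List.count_filter (by simpa using hxne)]
        rw [hcnt]
      · rw [if_neg (by rw [pv_count_head]; exact_mod_cast hc)]
        rw [List.filter_cons_of_neg (by simpa using hc)]
        rw [ih _ hrest]
        congr 1
        apply List.filter_congr
        intro x hx
        have hxne : x ≠ c := by
          have hmem := (PySem.Set.mem_ofList _ _).mp hx
          have := List.of_mem_filter hmem
          simpa using this
        have hcnt : List.count x (c :: t) = List.count x (List.filter (fun y => decide (y ≠ c)) t) := by
          rw [show List.count x (c :: t) = List.count x t from by simp [Ne.symm hxne]]
          rw [List.count_filter (by simpa using hxne)]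
        rw [hcnt]

-- ===== VERDICT (by name: the statement is the Claim_ definition above) =====
theorem starters_spec : Claim_equal_starters := by
  intro list k _
  unfold Spec_starters starters starters_alt
  dsimp only
  rw [pv_foldl_filter_map (fun (i : String) => 0 < PySem.Str.len i)
      (fun (i : String) => PySem.Chars.lowerChar (i.toList.headD ' '))
      (fun (d : PySem.Dict Char Int) (c : Char) =>
        if d.contains c = false then d.insert c 1
        else d.insert c (d.getD c 0 + 1)),
    pv_stepA_eq]
  set L : List Char :=
    (list.filter (fun w => decide (0 < PySem.Str.len w))).map
      (fun w => PySem.Chars.lowerChar (w.toList.headD ' ')) with hL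
  rw [PySem.Dict.foldl_insert_getD_add_one_eq_counter, PySem.Dict.keys_counter]
  have hnd : (PySem.Set.ofList L).Nodup := PySem.Set.nodup_ofList L
  have hfresh : forall c, c ∈ PySem.Set.ofList L -> String.ofList [c] ∉ (PySem.Set.empty : PySem.Set String) := by
    intro c _ hc
    simp [PySem.Set.empty] at hc
  rw [pv_setFold k (PySem.Dict.counter L) (PySem.Set.ofList L) PySem.Set.empty hnd hfresh]
  simp only [PySem.Set.empty, List.nil_append]
  rw [pv_goB_aux k L.length L le_rfl]
  congr 1
  apply List.filter_congr
  intro c _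
  simp [PySem.Dict.getD_counter]
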